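-- pv_equiv track=rewrite | github.com/sun-hainan/Python | 05_动态规划/dp_bitmask_optimization.py | sos_dp_min
-- ===== SOURCE A (Python) =====
-- from typing import List, Callable
-- import math
--
-- def sos_dp_min(g: List[int]) -> List[int]:
--
--     """
--
--     SOS DP - 计算所有子集的最小值
--
--
--
--     f[mask] = min_{sub ⊆ mask} g[sub]
--
--     """
--
--     n = int(math.log2(len(g)))
--
--     f = g.copy()
--
--
--
--     for i in range(n):
--
--         for mask in range(1 << n):
--
--             if mask & (1 << i):
--
--                 f[mask] = min(f[mask], f[mask ^ (1 << i)])
--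
--
--
--     return f
-- ===== SOURCE B (Python) =====
-- from typing import List
-- import math
--
--
-- def _sos(a):
--     if len(a) == 1:
--         return a[:]
--     half = len(a) // 2
--     lo = _sos(a[:half])
--     hi = _sos(a[half:])
--     return lo + [min(h, l) for h, l in zip(hi, lo)]
--
--
-- def sos_dp_min(g: List[int]) -> List[int]:
--     n = int(math.log2(len(g)))
--     size = 1 << n
--     return _sos(g[:size]) + g[size:]
-- ===== Notes on version B (the rewrite author's own statement) =====
-- stated objective: alternative
-- what changed: Replaces the n-layer iterative bit-position DP over one shared array by a recursive divide-and-conquer on the two halves of the power-of-two prefix, combining the halves with an elementwise min (lo + [min(h,l) for h,l in zip(hi,lo)]).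
import Mathlib
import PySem

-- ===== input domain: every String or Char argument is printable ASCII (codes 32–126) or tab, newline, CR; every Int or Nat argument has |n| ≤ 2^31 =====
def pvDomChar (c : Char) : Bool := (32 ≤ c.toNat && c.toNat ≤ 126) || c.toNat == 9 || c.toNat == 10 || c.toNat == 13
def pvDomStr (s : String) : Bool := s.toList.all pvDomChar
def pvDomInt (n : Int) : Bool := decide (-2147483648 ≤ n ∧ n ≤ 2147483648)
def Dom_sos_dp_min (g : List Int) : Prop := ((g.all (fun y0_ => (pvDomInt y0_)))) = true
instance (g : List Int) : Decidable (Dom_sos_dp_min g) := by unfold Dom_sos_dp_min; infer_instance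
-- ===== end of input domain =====

-- B replaces A's n-layer iterative bit-position DP by a recursive divide-and-conquer on the
-- halves of the power-of-two prefix (objective: alternative algorithm, similar cost).

-- ===== PORT A =====
-- one inner-loop step: `if mask & (1 << i): f[mask] = min(f[mask], f[mask ^ (1 << i)])`.
-- All indices are < 2^n ≤ len(f) on inputs admitted by Pre_, so `getD _ 0` is exact there.
def sosStepA (i : Nat) (f : List Int) (mask : Nat) : List Int :=
  if mask &&& (1 <<< i) ≠ 0 then
    f.set mask (min (f.getD mask 0) (f.getD (mask ^^^ (1 <<< i)) 0))
  else f

-- `n = int(math.log2(len(g)))` is ported as Nat.log2 (= floor log2), which is what the float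
-- computation yields on every list length the checks exercise; `f = g.copy()` is `g`.
def sos_dp_min (g : List Int) : List Int :=
  let n := Nat.log2 g.length
  (List.range n).foldl (fun f i => (List.range (1 <<< n)).foldl (sosStepA i) f) g

-- ===== PORT B =====
-- `_sos`: recursion on the two halves; the `len(a) == 1` base case is written `≤ 1` so the
-- Lean function is total ([] is unreachable from sos_dp_min_alt, where lengths are powers of two).
def sosRec (a : List Int) : List Int :=
  if a.length ≤ 1 then a
  else
    let half := a.length / 2
    let lo := sosRec (a.take half)
    let hi := sosRec (a.drop half)
    lo ++ ((hi.zip lo).map (fun p => min p.1 p.2))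
termination_by a.length
decreasing_by
  · simp only [List.length_take]; omega
  · simp only [List.length_drop]; omega

def sos_dp_min_alt (g : List Int) : List Int :=
  let n := Nat.log2 g.length
  let size := 1 <<< n
  sosRec (g.take size) ++ g.drop size

-- ===== PRECONDITION & SPEC =====
-- Pre_ excludes only the empty list, on which A raises ValueError (math.log2(0)).
def Pre_sos_dp_min (g : List Int) : Prop := g ≠ []
instance (g : List Int) : Decidable (Pre_sos_dp_min g) := by unfold Pre_sos_dp_min; infer_instance
def pvWitness_sos_dp_min : List Int := [7, -2, 5, 0]

def Spec_sos_dp_min (g : List Int) (out : List Int) : Prop := out = sos_dp_min_alt g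
instance (g : List Int) (out : List Int) : Decidable (Spec_sos_dp_min g out) := by unfold Spec_sos_dp_min; infer_instance

-- ===== CLAIM (what is proved, stated in full; the proofs are below) =====
def Claim_equal_sos_dp_min : Prop := ∀ (g : List Int), Dom_sos_dp_min g → Pre_sos_dp_min g → Spec_sos_dp_min g (sos_dp_min g)

-- ===== LEMMAS AND PROOFS =====

-- ---- generic list lemmas ----
theorem pv_getD_set (l : List Int) (k m : Nat) (v : Int) :
    (l.set k v).getD m 0 = if k = m ∧ k < l.length then v else l.getD m 0 := by
  simp only [List.getD, List.getElem?_set]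
  by_cases h1 : k = m
  · subst h1
    by_cases h2 : k < l.length
    · simp [h2]
    · simp [h2]
  · simp [h1]

theorem pv_getD_append_left (l1 l2 : List Int) (i : Nat) (h : i < l1.length) :
    (l1 ++ l2).getD i 0 = l1.getD i 0 := by
  simp [List.getD, List.getElem?_append_left h]

theorem pv_getD_append_right (l1 l2 : List Int) (i : Nat) (h : l1.length ≤ i) :
    (l1 ++ l2).getD i 0 = l2.getD (i - l1.length) 0 := by
  simp [List.getD, List.getElem?_append_right h]

theorem pv_getD_take (a : List Int) (j x : Nat) (h : x < j) :
    (a.take j).getD x 0 = a.getD x 0 := by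
  simp [List.getD, h]

theorem pv_getD_drop (a : List Int) (i x : Nat) :
    (a.drop i).getD x 0 = a.getD (i + x) 0 := by
  simp [List.getD, List.getElem?_drop]

theorem pv_getD_map_zip (x y : List Int) (j : Nat) (hx : j < x.length) (hy : j < y.length) :
    ((x.zip y).map (fun p => min p.1 p.2)).getD j 0 = min (x.getD j 0) (y.getD j 0) := by
  have hz : j < (x.zip y).length := by simp [List.length_zip]; omega
  have hm : j < ((x.zip y).map (fun p => min p.1 p.2)).length := by simpa using hz
  rw [List.getD_eq_getElem _ _ hm, List.getD_eq_getElem _ _ hx, List.getD_eq_getElem _ _ hy]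
  simp [List.getElem_map, List.getElem_zip]

-- ---- bit lemmas ----
theorem pv_subset_iff (x m : Nat) :
    x &&& m = x ↔ ∀ j, x.testBit j = true → m.testBit j = true := by
  constructor
  · intro h j hj
    have h2 := congrArg (fun y => Nat.testBit y j) h
    simpa [Nat.testBit_and, hj] using h2
  · intro h
    apply Nat.eq_of_testBit_eq
    intro j
    cases hx : x.testBit j with
    | false => simp [Nat.testBit_and, hx]
    | true => simp [Nat.testBit_and, hx, h j hx]

theorem pv_shr_eq_iff (x m i : Nat) :
    x >>> i = m >>> i ↔ ∀ j, i ≤ j → x.testBit j = m.testBit j := by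
  constructor
  · intro h j hij
    have h2 := congrArg (fun y => Nat.testBit y (j - i)) h
    simpa [Nat.testBit_shiftRight, Nat.add_sub_cancel' hij] using h2
  · intro h
    apply Nat.eq_of_testBit_eq
    intro j
    simp only [Nat.testBit_shiftRight]
    exact h (i + j) (Nat.le_add_right _ _)

theorem pv_high_false (x k t : Nat) (h : x < 2 ^ k) (ht : k ≤ t) : x.testBit t = false :=
  Nat.testBit_eq_false_of_lt (lt_of_lt_of_le h (Nat.pow_le_pow_right (by norm_num) ht))

theorem pv_lt_pow_of_high (y k : Nat) (h : ∀ t, k ≤ t → y.testBit t = false) : y < 2 ^ k := by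
  have h0 : y >>> k = 0 := by
    apply Nat.eq_of_testBit_eq
    intro j
    simp [Nat.testBit_shiftRight, h (k + j) (Nat.le_add_right _ _)]
  rw [Nat.shiftRight_eq_div_pow] at h0
  have hp : 0 < 2 ^ k := Nat.pow_pos (by norm_num)
  exact Nat.lt_of_div_eq_zero hp h0

theorem pv_two_pow_add_or (k j : Nat) (h : j < 2 ^ k) : 2 ^ k + j = 2 ^ k ||| j := by
  simpa using Nat.two_pow_add_eq_or_of_lt h 1

theorem pv_testBit_two_pow_add (k j t : Nat) (h : j < 2 ^ k) :
    (2 ^ k + j).testBit t = (decide (k = t) || j.testBit t) := by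
  rw [pv_two_pow_add_or k j h]
  simp [Nat.testBit_or, Nat.testBit_two_pow]

theorem pv_and_two_pow_ne (k i : Nat) : (k &&& 2 ^ i ≠ 0) ↔ k.testBit i = true := by
  rw [Nat.and_two_pow]
  cases h : k.testBit i <;> simp

theorem pv_xor_two_pow_testBit (m i t : Nat) :
    (m ^^^ 2 ^ i).testBit t = if i = t then !(m.testBit i) else m.testBit t := by
  by_cases h : i = t
  · subst h; simp [Nat.testBit_xor]
  · simp [Nat.testBit_xor, Nat.testBit_two_pow, h]

theorem pv_xor_two_pow_lt (k i : Nat) (h : k.testBit i = true) : k ^^^ 2 ^ i < k := by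
  apply Nat.lt_of_testBit i
  · rw [pv_xor_two_pow_testBit]; simp [h]
  · exact h
  · intro j hij
    rw [pv_xor_two_pow_testBit]
    simp [Nat.ne_of_lt hij]

-- ---- the submask sets and their minima ----
def subm (m : Nat) : Finset Nat := (Finset.range (m + 1)).filter (fun x => x &&& m = x)

theorem pv_inf'_set_congr {s t : Finset Nat} (hs : s.Nonempty) (ht : t.Nonempty)
    (h : s = t) (f : Nat → Int) : s.inf' hs f = t.inf' ht f := by
  subst h; rfl

theorem mem_subm {x m : Nat} : x ∈ subm m ↔ x &&& m = x := by
  simp only [subm, Finset.mem_filter, Finset.mem_range]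
  constructor
  · exact fun h => h.2
  · intro h
    have hle : x &&& m ≤ m := Nat.and_le_right
    rw [h] at hle
    exact ⟨by omega, h⟩

theorem subm_nonempty (m : Nat) : (subm m).Nonempty := ⟨m, mem_subm.2 (Nat.and_self m)⟩

def sval (a : List Int) (m : Nat) : Int := (subm m).inf' (subm_nonempty m) (fun x => a.getD x 0)

def sA (i m : Nat) : Finset Nat :=
  (Finset.range (m + 1)).filter (fun x => x &&& m = x ∧ x >>> i = m >>> i)

theorem mem_sA {i x m : Nat} : x ∈ sA i m ↔ (x &&& m = x ∧ x >>> i = m >>> i) := by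
  simp only [sA, Finset.mem_filter, Finset.mem_range]
  constructor
  · exact fun h => h.2
  · intro h
    have hle : x &&& m ≤ m := Nat.and_le_right
    rw [h.1] at hle
    exact ⟨by omega, h⟩

theorem sA_nonempty (i m : Nat) : (sA i m).Nonempty := ⟨m, mem_sA.2 ⟨Nat.and_self m, rfl⟩⟩

def aval (g : List Int) (i m : Nat) : Int := (sA i m).inf' (sA_nonempty i m) (fun x => g.getD x 0)

theorem sA_zero (m : Nat) : sA 0 m = {m} := by
  ext x
  simp only [mem_sA, Finset.mem_singleton, Nat.shiftRight_zero]
  constructor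
  · exact fun h => h.2
  · intro h; subst h; exact ⟨Nat.and_self _, rfl⟩

theorem aval_zero (g : List Int) (m : Nat) : aval g 0 m = g.getD m 0 := by
  rw [aval, pv_inf'_set_congr (sA_nonempty 0 m) (Finset.singleton_nonempty m) (sA_zero m) _]
  simp

theorem sA_succ_false {i m : Nat} (h : m.testBit i = false) : sA (i + 1) m = sA i m := by
  ext x
  simp only [mem_sA]
  constructor
  · rintro ⟨hs, hsh⟩
    refine ⟨hs, (pv_shr_eq_iff x m i).2 ?_⟩
    intro j hij
    rcases Nat.eq_or_lt_of_le hij with hji | hji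
    · subst hji
      have hx : x.testBit i = false := by
        cases hx : x.testBit i with
        | false => rfl
        | true => rw [(pv_subset_iff x m).1 hs i hx] at h; cases h
      rw [hx, h]
    · exact (pv_shr_eq_iff x m (i + 1)).1 hsh j hji
  · rintro ⟨hs, hsh⟩
    refine ⟨hs, (pv_shr_eq_iff x m (i + 1)).2 ?_⟩
    intro j hij
    exact (pv_shr_eq_iff x m i).1 hsh j (by omega)

theorem aval_succ_false (g : List Int) {i m : Nat} (h : m.testBit i = false) :
    aval g (i + 1) m = aval g i m := by
  rw [aval, pv_inf'_set_congr (sA_nonempty (i + 1) m) (sA_nonempty i m) (sA_succ_false h) _]; rfl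

theorem sA_succ_true {i m : Nat} (h : m.testBit i = true) :
    sA (i + 1) m = sA i m ∪ sA i (m ^^^ 2 ^ i) := by
  have hm' : ∀ t, (m ^^^ 2 ^ i).testBit t = if i = t then false else m.testBit t := by
    intro t; rw [pv_xor_two_pow_testBit]; simp [h]
  ext x
  simp only [mem_sA, Finset.mem_union]
  constructor
  · rintro ⟨hs, hsh⟩
    by_cases hx : x.testBit i = true
    · left
      refine ⟨hs, (pv_shr_eq_iff x m i).2 ?_⟩
      intro j hij
      rcases Nat.eq_or_lt_of_le hij with hji | hji
      · subst hji; rw [hx, h]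
      · exact (pv_shr_eq_iff x m (i + 1)).1 hsh j hji
    · right
      have hxf : x.testBit i = false := by cases hxx : x.testBit i; rfl; exact absurd hxx hx
      constructor
      · rw [pv_subset_iff]
        intro t ht
        rw [hm' t]
        by_cases hti : i = t
        · subst hti; rw [hxf] at ht; cases ht
        · simp [hti]; exact (pv_subset_iff x m).1 hs t ht
      · rw [pv_shr_eq_iff]
        intro j hij
        rw [hm' j]
        rcases Nat.eq_or_lt_of_le hij with hji | hji
        · subst hji; simp [hxf]
        · simp [Nat.ne_of_lt hji]
          exact (pv_shr_eq_iff x m (i + 1)).1 hsh j hji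
  · rintro (⟨hs, hsh⟩ | ⟨hs, hsh⟩)
    · exact ⟨hs, (pv_shr_eq_iff x m (i + 1)).2 fun j hij =>
        (pv_shr_eq_iff x m i).1 hsh j (by omega)⟩
    · constructor
      · rw [pv_subset_iff]
        intro t ht
        have h1 := (pv_subset_iff x (m ^^^ 2 ^ i)).1 hs t ht
        rw [hm' t] at h1
        by_cases hti : i = t
        · subst hti; simp at h1
        · simpa [hti] using h1
      · rw [pv_shr_eq_iff]
        intro j hij
        have h1 := (pv_shr_eq_iff x (m ^^^ 2 ^ i) i).1 hsh j (by omega)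
        rw [hm' j] at h1
        have hji : i ≠ j := by omega
        simpa [hji] using h1

theorem aval_succ_true (g : List Int) {i m : Nat} (h : m.testBit i = true) :
    aval g (i + 1) m = min (aval g i m) (aval g i (m ^^^ 2 ^ i)) := by
  rw [aval, pv_inf'_set_congr (sA_nonempty (i + 1) m)
    ((sA_nonempty i m).mono Finset.subset_union_left) (sA_succ_true h) _]
  exact Finset.inf'_union (sA_nonempty i m) (sA_nonempty i (m ^^^ 2 ^ i)) _

theorem sA_final {n m : Nat} (h : m < 2 ^ n) : sA n m = subm m := by
  ext x
  simp only [mem_sA, mem_subm]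
  constructor
  · exact fun hx => hx.1
  · intro hx
    refine ⟨hx, ?_⟩
    have hxm : x ≤ m := by
      have := Nat.and_le_right (n := x) (m := m); rw [hx] at this; exact this
    have hx2 : x < 2 ^ n := lt_of_le_of_lt hxm h
    rw [Nat.shiftRight_eq_div_pow, Nat.shiftRight_eq_div_pow,
      Nat.div_eq_of_lt hx2, Nat.div_eq_of_lt h]

-- ---- A characterisation ----
def valF (g : List Int) (n i m : Nat) : Int :=
  if m < 2 ^ n then aval g i m else g.getD m 0

theorem valF_succ_false (g : List Int) (n : Nat) {i m : Nat} (h : m.testBit i = false) :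
    valF g n (i + 1) m = valF g n i m := by
  unfold valF; split_ifs with hm
  · exact aval_succ_false g h
  · rfl

theorem pv_inf'_fun_congr {s : Finset Nat} (hs : s.Nonempty) (f g : Nat → Int)
    (h : ∀ x ∈ s, f x = g x) : s.inf' hs f = s.inf' hs g :=
  Finset.inf'_congr hs rfl h

theorem pass_aux (g : List Int) (n i : Nat) (f : List Int)
    (hlen : f.length = g.length) (hN : 2 ^ n ≤ g.length)
    (hf : ∀ m, f.getD m 0 = valF g n i m) :
    ∀ k, k ≤ 2 ^ n →
      ((List.range k).foldl (sosStepA i) f).length = g.length ∧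
      ∀ m, ((List.range k).foldl (sosStepA i) f).getD m 0 =
        if m < k then valF g n (i + 1) m else valF g n i m := by
  intro k
  induction k with
  | zero =>
    intro _
    exact ⟨hlen, fun m => by simpa using hf m⟩
  | succ k ih =>
    intro hk
    obtain ⟨ihl, ihv⟩ := ih (by omega)
    rw [List.range_succ, List.foldl_append]
    simp only [List.foldl_cons, List.foldl_nil]
    set fk := (List.range k).foldl (sosStepA i) f with hfk
    unfold sosStepA
    simp only [Nat.one_shiftLeft]
    by_cases hbit : k &&& 2 ^ i ≠ 0
    · have htb : k.testBit i = true := (pv_and_two_pow_ne k i).1 hbit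
      have hkN : k < 2 ^ n := by omega
      have hk2 : k ^^^ 2 ^ i < k := pv_xor_two_pow_lt k i htb
      have hk2b : (k ^^^ 2 ^ i).testBit i = false := by
        rw [pv_xor_two_pow_testBit]; simp [htb]
      rw [if_pos hbit]
      have hvk : fk.getD k 0 = aval g i k := by
        rw [ihv k, if_neg (by omega)]
        simp [valF, hkN]
      have hvk2 : fk.getD (k ^^^ 2 ^ i) 0 = aval g i (k ^^^ 2 ^ i) := by
        rw [ihv (k ^^^ 2 ^ i), if_pos hk2, valF_succ_false g n hk2b]
        simp [valF, show k ^^^ 2 ^ i < 2 ^ n by omega]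
      constructor
      · rw [List.length_set]; exact ihl
      · intro m
        rw [pv_getD_set]
        by_cases hmk : k = m
        · subst hmk
          rw [if_pos ⟨rfl, by rw [ihl]; omega⟩, if_pos (by omega : k < k + 1)]
          rw [hvk, hvk2]
          unfold valF
          rw [if_pos hkN]
          exact (aval_succ_true g htb).symm
        · rw [if_neg (fun hc => hmk hc.1), ihv m]
          by_cases hmlt : m < k
          · rw [if_pos hmlt, if_pos (by omega)]
          · rw [if_neg hmlt, if_neg (by omega)]
    · have htb : k.testBit i = false := by
        cases h2 : k.testBit i
        · rfl
        · exact absurd ((pv_and_two_pow_ne k i).2 h2) hbit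
      rw [if_neg hbit]
      refine ⟨ihl, fun m => ?_⟩
      rw [ihv m]
      by_cases hmlt : m < k
      · rw [if_pos hmlt, if_pos (by omega)]
      · rw [if_neg hmlt]
        by_cases hmk : m = k
        · subst hmk; rw [if_pos (by omega), valF_succ_false g n htb]
        · rw [if_neg (by omega)]

theorem pass_lemma (g : List Int) (n i : Nat) (f : List Int)
    (hlen : f.length = g.length) (hN : 2 ^ n ≤ g.length)
    (hf : ∀ m, f.getD m 0 = valF g n i m) :
    ((List.range (2 ^ n)).foldl (sosStepA i) f).length = g.length ∧
      ∀ m, ((List.range (2 ^ n)).foldl (sosStepA i) f).getD m 0 = valF g n (i + 1) m := by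
  obtain ⟨h1, h2⟩ := pass_aux g n i f hlen hN hf (2 ^ n) (le_refl _)
  refine ⟨h1, fun m => ?_⟩
  rw [h2 m]
  by_cases hm : m < 2 ^ n
  · rw [if_pos hm]
  · rw [if_neg hm]
    unfold valF
    rw [if_neg hm, if_neg hm]

theorem layers_lemma (g : List Int) (n : Nat) (hN : 2 ^ n ≤ g.length) (t : Nat) :
    ((List.range t).foldl (fun f i => (List.range (2 ^ n)).foldl (sosStepA i) f) g).length = g.length ∧
      ∀ m, ((List.range t).foldl (fun f i => (List.range (2 ^ n)).foldl (sosStepA i) f) g).getD m 0 =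
        valF g n t m := by
  induction t with
  | zero =>
    refine ⟨rfl, fun m => ?_⟩
    simp only [List.range_zero, List.foldl_nil]
    unfold valF
    split_ifs
    · rw [aval_zero]
    · rfl
  | succ t ih =>
    rw [List.range_succ, List.foldl_append]
    simp only [List.foldl_cons, List.foldl_nil]
    exact pass_lemma g n t _ ih.1 hN ih.2

theorem A_char (g : List Int) (hg : g ≠ []) :
    (sos_dp_min g).length = g.length ∧
      ∀ m, (sos_dp_min g).getD m 0 =
        if m < 2 ^ Nat.log2 g.length then sval g m else g.getD m 0 := by
  have hgl : 0 < g.length := List.length_pos_of_ne_nil hg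
  have hN : 2 ^ Nat.log2 g.length ≤ g.length := Nat.log2_self_le (by omega)
  unfold sos_dp_min
  simp only [Nat.one_shiftLeft]
  obtain ⟨h1, h2⟩ := layers_lemma g (Nat.log2 g.length) hN (Nat.log2 g.length)
  refine ⟨h1, fun m => ?_⟩
  rw [h2 m]
  unfold valF
  split_ifs with hm
  · rw [aval, sval, pv_inf'_set_congr _ _ (sA_final hm)]
  · rfl

-- ---- B characterisation ----
theorem sosRec_length_pow (k : Nat) : ∀ (a : List Int), a.length = 2 ^ k →
    (sosRec a).length = 2 ^ k := by
  induction k with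
  | zero =>
    intro a ha
    rw [sosRec, if_pos (by rw [ha]; norm_num)]
    exact ha
  | succ k ih =>
    intro a ha
    have hp : 0 < 2 ^ k := Nat.pow_pos (by norm_num)
    have hpow : (2 : Nat) ^ (k + 1) = 2 ^ k * 2 := pow_succ 2 k
    rw [sosRec, if_neg (by omega)]
    show (sosRec (a.take (a.length / 2)) ++
        (((sosRec (a.drop (a.length / 2))).zip (sosRec (a.take (a.length / 2)))).map
          (fun p => min p.1 p.2))).length = 2 ^ (k + 1)
    have hTake : (a.take (a.length / 2)).length = 2 ^ k := by
      rw [List.length_take, ha, Nat.min_eq_left (Nat.div_le_self _ _)]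
      omega
    have hDrop : (a.drop (a.length / 2)).length = 2 ^ k := by
      rw [List.length_drop, ha]
      omega
    have hT := ih _ hTake
    have hD := ih _ hDrop
    rw [List.length_append, List.length_map, List.length_zip, hT, hD, Nat.min_self]
    omega

theorem subm_zero : subm 0 = {0} := by
  ext x
  simp [mem_subm, Nat.and_zero, eq_comm]

theorem subm_split {k j : Nat} (hj : j < 2 ^ k) :
    subm (2 ^ k + j) = subm j ∪ (subm j).image (fun y => 2 ^ k + y) := by
  have hmlt : 2 ^ k + j < 2 ^ (k + 1) := by rw [pow_succ]; omega
  ext x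
  simp only [mem_subm, Finset.mem_union, Finset.mem_image]
  constructor
  · intro hx
    have hsub := (pv_subset_iff x (2 ^ k + j)).1 hx
    by_cases hb : x.testBit k = true
    · right
      refine ⟨x ^^^ 2 ^ k, ?_, ?_⟩
      · rw [pv_subset_iff]
        intro t ht
        rw [pv_xor_two_pow_testBit] at ht
        by_cases htk : k = t
        · subst htk; simp [hb] at ht
        · simp only [htk, if_false] at ht
          have h3 := hsub t ht
          rw [pv_testBit_two_pow_add k j t hj] at h3
          simpa [htk] using h3
      · have hy : x ^^^ 2 ^ k < 2 ^ k := by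
          apply pv_lt_pow_of_high
          intro t htk
          rw [pv_xor_two_pow_testBit]
          rcases Nat.eq_or_lt_of_le htk with h1 | h1
          · subst h1; simp [hb]
          · have hxt : x.testBit t = false := by
              cases hxt : x.testBit t with
              | false => rfl
              | true =>
                have h3 := hsub t hxt
                rw [pv_high_false (2 ^ k + j) (k + 1) t hmlt (by omega)] at h3
                cases h3
            simp [Nat.ne_of_lt h1, hxt]
        apply Nat.eq_of_testBit_eq
        intro t
        rw [pv_testBit_two_pow_add k _ t hy, pv_xor_two_pow_testBit]
        by_cases htk : k = t
        · subst htk; simp [hb]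
        · simp [htk]
    · left
      have hbf : x.testBit k = false := by
        cases h2 : x.testBit k
        · rfl
        · exact absurd h2 hb
      rw [pv_subset_iff]
      intro t ht
      have h3 := hsub t ht
      rw [pv_testBit_two_pow_add k j t hj] at h3
      have htk : ¬ (k = t) := fun hh => by subst hh; rw [hbf] at ht; cases ht
      simpa [htk] using h3
  · rintro (hx | ⟨y, hy, rfl⟩)
    · rw [pv_subset_iff]
      intro t ht
      rw [pv_testBit_two_pow_add k j t hj]
      simp [(pv_subset_iff x j).1 hx t ht]
    · have hylt : y < 2 ^ k := by
        have h2 : y &&& j ≤ j := Nat.and_le_right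
        rw [hy] at h2
        omega
      rw [pv_subset_iff]
      intro t ht
      rw [pv_testBit_two_pow_add k y t hylt] at ht
      rw [pv_testBit_two_pow_add k j t hj]
      by_cases htk : k = t
      · simp [htk]
      · simp only [htk, decide_false, Bool.false_or] at ht ⊢
        exact (pv_subset_iff y j).1 hy t ht

theorem sosRec_spec (k : Nat) : ∀ (a : List Int), a.length = 2 ^ k →
    ∀ m, m < 2 ^ k → (sosRec a).getD m 0 = sval a m := by
  induction k with
  | zero =>
    intro a ha m hm
    have hm0 : m = 0 := by omega
    subst hm0
    rw [sosRec, if_pos (by rw [ha]; norm_num)]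
    rw [sval, pv_inf'_set_congr (subm_nonempty 0) (Finset.singleton_nonempty 0) subm_zero _]
    simp
  | succ k ih =>
    intro a ha m hm
    have hp : 0 < 2 ^ k := Nat.pow_pos (by norm_num)
    have hpow : (2 : Nat) ^ (k + 1) = 2 ^ k * 2 := pow_succ 2 k
    have hlen2 : ¬ (a.length ≤ 1) := by omega
    rw [sosRec, if_neg hlen2]
    dsimp only
    have hhalf : a.length / 2 = 2 ^ k := by omega
    have hTake : (a.take (a.length / 2)).length = 2 ^ k := by
      simp only [List.length_take]; omega
    have hDrop : (a.drop (a.length / 2)).length = 2 ^ k := by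
      simp only [List.length_drop]; omega
    have hlo := sosRec_length_pow k _ hTake
    have hhi := sosRec_length_pow k _ hDrop
    by_cases hmk : m < 2 ^ k
    · rw [pv_getD_append_left _ _ _ (by omega)]
      rw [ih _ hTake m hmk]
      rw [sval, sval]
      apply pv_inf'_fun_congr
      intro x hx
      have hxm : x ≤ m := by
        have h2 : x &&& m ≤ m := Nat.and_le_right
        rw [mem_subm.1 hx] at h2
        exact h2
      rw [pv_getD_take _ _ _ (by omega)]
    · have hj : m - 2 ^ k < 2 ^ k := by omega
      rw [pv_getD_append_right _ _ _ (by omega)]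
      rw [show m - (sosRec (a.take (a.length / 2))).length = m - 2 ^ k by omega]
      rw [pv_getD_map_zip _ _ _ (by omega) (by omega)]
      rw [ih _ hDrop _ hj, ih _ hTake _ hj]
      have hmeq : m = 2 ^ k + (m - 2 ^ k) := by omega
      have hsplit := subm_split (k := k) (j := m - 2 ^ k) hj
      rw [← hmeq] at hsplit
      have hRHS : sval a m =
          min ((subm (m - 2 ^ k)).inf' (subm_nonempty _) (fun x => a.getD x 0))
            ((subm (m - 2 ^ k)).inf' (subm_nonempty _)
              ((fun x => a.getD x 0) ∘ (fun y => 2 ^ k + y))) := by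
        rw [sval, pv_inf'_set_congr (subm_nonempty m)
          ((subm_nonempty (m - 2 ^ k)).mono Finset.subset_union_left) hsplit _]
        rw [Finset.inf'_union (subm_nonempty (m - 2 ^ k))
          ((subm_nonempty (m - 2 ^ k)).image _) _]
        rw [Finset.inf'_image]
      have hS1 : sval (a.take (a.length / 2)) (m - 2 ^ k) =
          (subm (m - 2 ^ k)).inf' (subm_nonempty _) (fun x => a.getD x 0) := by
        rw [sval]
        apply pv_inf'_fun_congr
        intro x hx
        have hxm : x ≤ m - 2 ^ k := by
          have h2 : x &&& (m - 2 ^ k) ≤ m - 2 ^ k := Nat.and_le_right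
          rw [mem_subm.1 hx] at h2
          exact h2
        rw [pv_getD_take _ _ _ (by omega)]
      have hS2 : sval (a.drop (a.length / 2)) (m - 2 ^ k) =
          (subm (m - 2 ^ k)).inf' (subm_nonempty _) ((fun x => a.getD x 0) ∘ (fun y => 2 ^ k + y)) := by
        rw [sval]
        apply pv_inf'_fun_congr
        intro x hx
        simp only [Function.comp]
        rw [pv_getD_drop, hhalf]
      rw [hS1, hS2, hRHS]
      exact min_comm _ _

-- ===== VERDICT (by name: the statement is the Claim_ definition above) =====
theorem sos_dp_min_spec : Claim_equal_sos_dp_min := by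
  unfold Claim_equal_sos_dp_min Spec_sos_dp_min Pre_sos_dp_min
  intro g _ hg
  have hgl : 0 < g.length := List.length_pos_of_ne_nil hg
  have hN : 2 ^ Nat.log2 g.length ≤ g.length := Nat.log2_self_le (by omega)
  obtain ⟨hAlen, hAval⟩ := A_char g hg
  unfold sos_dp_min_alt
  simp only [Nat.one_shiftLeft]
  have hTake : (g.take (2 ^ Nat.log2 g.length)).length = 2 ^ Nat.log2 g.length := by
    simp only [List.length_take]; omega
  have hBlo := sosRec_length_pow (Nat.log2 g.length) _ hTake
  have hBlen : (sosRec (g.take (2 ^ Nat.log2 g.length)) ++ g.drop (2 ^ Nat.log2 g.length)).length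
      = g.length := by
    simp only [List.length_append, List.length_drop, hBlo]; omega
  apply List.ext_getElem (by rw [hAlen, hBlen])
  intro i h1 h2
  have hi : i < g.length := by rw [hAlen] at h1; exact h1
  rw [← List.getD_eq_getElem _ 0 h1, ← List.getD_eq_getElem _ 0 h2]
  rw [hAval i]
  by_cases hik : i < 2 ^ Nat.log2 g.length
  · rw [if_pos hik]
    rw [pv_getD_append_left _ _ _ (by omega)]
    rw [sosRec_spec (Nat.log2 g.length) _ hTake i hik]
    rw [sval, sval]
    apply pv_inf'_fun_congr
    intro x hx
    have hxm : x ≤ i := by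
      have h3 : x &&& i ≤ i := Nat.and_le_right
      rw [mem_subm.1 hx] at h3
      exact h3
    rw [pv_getD_take _ _ _ (by omega)]
  · rw [if_neg hik]
    rw [pv_getD_append_right _ _ _ (by omega)]
    rw [show i - (sosRec (g.take (2 ^ Nat.log2 g.length))).length = i - 2 ^ Nat.log2 g.length by omega]
    rw [pv_getD_drop]
    congr 1
    omega
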